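-- pv_equiv track=rewrite | github.com/Weig12/CRC_risk | calculate_mhl_multiAmplicons.py | runs_of_char
-- ===== SOURCE A (Python) =====
-- from typing import Dict, List
--
-- def runs_of_char(s: str, ch: str = "C") -> List[int]:
--     runs = []
--     cur = 0
--     for c in s:
--         if c == ch:
--             cur += 1
--         else:
--             if cur > 0:
--                 runs.append(cur)
--                 cur = 0
--     if cur > 0:
--         runs.append(cur)
--     return runs
-- ===== SOURCE B (Python) =====
-- from itertools import groupby
--
-- def runs_of_char(s: str, ch: str = "C"):
--     return [len(list(g)) for k, g in groupby(s) if k == ch]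
-- ===== Notes on version B (the rewrite author's own statement) =====
-- stated objective: idiomatic
-- what changed: Replaces the explicit cur counter with its two flush points by an itertools.groupby pass: split s into maximal runs of identical characters, then keep the lengths of the groups whose key equals ch.
import Mathlib
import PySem

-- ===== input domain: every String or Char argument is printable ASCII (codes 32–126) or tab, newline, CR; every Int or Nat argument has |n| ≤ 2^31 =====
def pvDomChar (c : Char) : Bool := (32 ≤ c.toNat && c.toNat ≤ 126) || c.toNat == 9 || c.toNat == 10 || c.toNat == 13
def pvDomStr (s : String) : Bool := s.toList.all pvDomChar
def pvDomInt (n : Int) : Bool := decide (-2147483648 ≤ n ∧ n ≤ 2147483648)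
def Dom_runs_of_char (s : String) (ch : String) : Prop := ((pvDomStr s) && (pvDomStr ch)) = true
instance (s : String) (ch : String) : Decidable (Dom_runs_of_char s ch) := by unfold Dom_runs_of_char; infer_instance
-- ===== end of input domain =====

-- B replaces A's explicit counter with its two flush points by a group-then-filter pass
-- (itertools.groupby): same O(n) cost, a more idiomatic decomposition.

-- ===== PORT A =====
-- one loop step of A: compare the character (as a 1-char string) to ch, count or flush
def runsStepA (ch : String) (st : List Int × Int) (c : Char) : List Int × Int :=
  if String.ofList [c] == ch then (st.1, st.2 + 1)
  else if st.2 > 0 then (st.1 ++ [st.2], 0) else st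

def runs_of_char (s : String) (ch : String) : List Int :=
  let st := s.toList.foldl (runsStepA ch) ([], 0)
  if st.2 > 0 then st.1 ++ [st.2] else st.1

-- ===== PORT B =====
-- itertools.groupby: maximal runs of identical characters, as (key, run length) pairs
def pvGroups : List Char → List (Char × Nat)
  | [] => []
  | c :: rest =>
      (c, (rest.takeWhile (· == c)).length + 1) :: pvGroups (rest.dropWhile (· == c))
termination_by l => l.length
decreasing_by
  exact Nat.lt_succ_of_le (List.length_dropWhile_le (· == c) rest)

def runs_of_char_alt (s : String) (ch : String) : List Int :=
  ((pvGroups s.toList).filter (fun g => String.ofList [g.1] == ch)).map (fun g => (g.2 : Int))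

-- ===== PRECONDITION & SPEC =====
def Spec_runs_of_char (s : String) (ch : String) (out : List Int) : Prop := out = runs_of_char_alt s ch
instance (s : String) (ch : String) (out : List Int) : Decidable (Spec_runs_of_char s ch out) := by unfold Spec_runs_of_char; infer_instance

-- ===== CLAIM (what is proved, stated in full; the proofs are below) =====
def Claim_equal_runs_of_char : Prop := ∀ (s : String) (ch : String), Dom_runs_of_char s ch → Spec_runs_of_char s ch (runs_of_char s ch)

-- ===== LEMMAS AND PROOFS =====

theorem pvGroups_nil : pvGroups [] = [] := by rw [pvGroups]

theorem pvGroups_cons (c : Char) (rest : List Char) :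
    pvGroups (c :: rest) =
      (c, (rest.takeWhile (· == c)).length + 1) :: pvGroups (rest.dropWhile (· == c)) := by
  rw [pvGroups]

-- proof-only helper: the runs still to be emitted by A, given k pending matches
def pvG (ch : String) : Nat → List Char → List Int
  | k, [] => if k > 0 then [(k : Int)] else []
  | k, c :: l =>
      if String.ofList [c] == ch then pvG ch (k + 1) l
      else (if k > 0 then [(k : Int)] else []) ++ pvG ch 0 l

-- B's value on a raw character list
def pvAltL (ch : String) (l : List Char) : List Int :=
  ((pvGroups l).filter (fun g => String.ofList [g.1] == ch)).map (fun g => (g.2 : Int))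

theorem pvAltL_cons (ch : String) (c : Char) (l : List Char) :
    pvAltL ch (c :: l) =
      if String.ofList [c] == ch
      then (((l.takeWhile (· == c)).length + 1 : Nat) : Int) :: pvAltL ch (l.dropWhile (· == c))
      else pvAltL ch (l.dropWhile (· == c)) := by
  by_cases h : (String.ofList [c] == ch) = true <;>
    simp [pvAltL, pvGroups_cons, h]

theorem pvAltL_cons_neg (ch : String) (c : Char) (l : List Char)
    (h : ¬ (String.ofList [c] == ch) = true) :
    pvAltL ch (c :: l) = pvAltL ch l := by
  rw [pvAltL_cons, if_neg h]
  cases l with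
  | nil => simp
  | cons y l' =>
    by_cases hy : (y == c) = true
    · have hyc : y = c := by simpa using hy
      subst hyc
      rw [show List.dropWhile (· == y) (y :: l') = List.dropWhile (· == y) l' by simp,
          pvAltL_cons, if_neg h]
    · rw [show List.dropWhile (· == c) (y :: l') = y :: l' by simp [hy]]

-- A's fold, started with k pending matches, finishes to acc ++ pvG ch k l
theorem pvFold_eq (ch : String) (l : List Char) :
    ∀ (acc : List Int) (k : Nat),
      (let st := l.foldl (runsStepA ch) (acc, (k : Int))
       if st.2 > 0 then st.1 ++ [st.2] else st.1) = acc ++ pvG ch k l := by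
  induction l with
  | nil =>
    intro acc k
    by_cases hk : k > 0
    · simp [pvG, hk]
    · have : k = 0 := by omega
      subst this; simp [pvG]
  | cons c l ih =>
    intro acc k
    by_cases h : (String.ofList [c] == ch) = true
    · have hs : runsStepA ch (acc, (k : Int)) c = (acc, ((k + 1 : Nat) : Int)) := by
        simp [runsStepA, h]
      simp only [List.foldl_cons, hs, ih acc (k + 1), pvG, h, if_pos]
    · by_cases hk : k > 0
      · have hs : runsStepA ch (acc, (k : Int)) c = (acc ++ [(k : Int)], ((0 : Nat) : Int)) := by
          simp [runsStepA, h]; omega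
        simp only [List.foldl_cons, hs, ih (acc ++ [(k : Int)]) 0]
        simp [pvG, h, hk, List.append_assoc]
      · have hk0 : k = 0 := by omega
        subst hk0
        have hs : runsStepA ch (acc, ((0 : Nat) : Int)) c = (acc, ((0 : Nat) : Int)) := by
          simp [runsStepA, h]
        simp only [List.foldl_cons, hs, ih acc 0]
        simp [pvG, h]

-- inside a matching run, pvG counts the whole takeWhile block
theorem pvG_run (ch : String) (c : Char) (h : (String.ofList [c] == ch) = true) :
    ∀ (l : List Char) (k : Nat),
      pvG ch (k + 1) l =
        ((k + 1 + (l.takeWhile (· == c)).length : Nat) : Int) ::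
          pvG ch 0 (l.dropWhile (· == c)) := by
  intro l
  induction l with
  | nil => intro k; simp [pvG]
  | cons x r ih =>
    intro k
    by_cases hx : (x == c) = true
    · have hxc : x = c := by simpa using hx
      subst hxc
      rw [show List.takeWhile (· == x) (x :: r) = x :: List.takeWhile (· == x) r by simp,
          show List.dropWhile (· == x) (x :: r) = List.dropWhile (· == x) r by simp]
      rw [pvG, if_pos h, ih (k + 1)]
      simp
      ring
    · have hxch : ¬ (String.ofList [x] == ch) = true := by
        intro hc
        have h1 : String.ofList [x] = ch := by simpa using hc
        have h2 : String.ofList [c] = ch := by simpa using h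
        have hxc : x = c := by
          have := congrArg String.toList (h1.trans h2.symm)
          simpa using this
        exact hx (by simpa using hxc)
      rw [show List.takeWhile (· == c) (x :: r) = [] by simp [hx],
          show List.dropWhile (· == c) (x :: r) = x :: r by simp [hx]]
      rw [pvG, if_neg hxch]
      rw [show pvG ch 0 (x :: r) = pvG ch 0 r from by rw [pvG, if_neg hxch]; simp]
      simp

-- B equals the pending-run description with no pending matches
theorem pvAltL_eq_pvG (ch : String) :
    ∀ (n : Nat) (l : List Char), l.length ≤ n → pvAltL ch l = pvG ch 0 l := by
  intro n
  induction n with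
  | zero =>
    intro l hl
    have hnil : l = [] := by cases l with
      | nil => rfl
      | cons a t => simp at hl
    subst hnil
    simp [pvAltL, pvGroups_nil, pvG]
  | succ n ih =>
    intro l hl
    cases l with
    | nil => simp [pvAltL, pvGroups_nil, pvG]
    | cons c l' =>
      by_cases h : (String.ofList [c] == ch) = true
      · rw [pvAltL_cons, if_pos h]
        rw [pvG, if_pos h, pvG_run ch c h l' 0]
        have hlen : (l'.dropWhile (· == c)).length ≤ n := by
          have := List.length_dropWhile_le (· == c) l'
          simp at hl; omega
        rw [ih _ hlen]
        norm_num
        omega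
      · rw [pvAltL_cons_neg ch c l' h]
        rw [pvG, if_neg h]
        have hlen : l'.length ≤ n := by simp at hl; omega
        rw [ih l' hlen]
        simp

-- ===== VERDICT (by name: the statement is the Claim_ definition above) =====
theorem runs_of_char_spec : Claim_equal_runs_of_char := by
  intro s ch _
  show runs_of_char s ch = runs_of_char_alt s ch
  have h := pvFold_eq ch s.toList [] 0
  simp only [Int.natCast_zero, List.nil_append] at h
  rw [runs_of_char]
  simp only [h]
  rw [show runs_of_char_alt s ch = pvAltL ch s.toList from rfl,
      pvAltL_eq_pvG ch s.toList.length s.toList le_rfl]
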